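-- pv_equiv track=rewrite | github.com/dannyyuan06/Paper-1 | advent/10ad1.py | find_routes
-- ===== SOURCE A (Python) =====
-- def find_routes(routes, prev_routes):
--   dictionary = {}
--   for route in routes:
--     key = "_".join(list(map(lambda x: str(x), route[:-1])))
--     if key in dictionary:
--       dictionary[key] += 1
--     else: dictionary[key] = 1
--   for route in prev_routes:
--     key = "_".join(list(map(lambda x: str(x), route[:-1])))
--     if key in dictionary:
--       dictionary[key] += 1
--     else: dictionary[key] = 1
--   for key in dictionary:
--     if dictionary[key] == 2 and key != "-1_-1": return True
--   return False
-- ===== SOURCE B (Python) =====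
-- def find_routes(routes, prev_routes):
--   keys = sorted("_".join(str(x) for x in route[:-1]) for route in routes + prev_routes)
--   i, n = 0, len(keys)
--   while i < n:
--     j = i
--     while j < n and keys[j] == keys[i]:
--       j += 1
--     if j - i == 2 and keys[i] != "-1_-1":
--       return True
--     i = j
--   return False
-- ===== Notes on version B (the rewrite author's own statement) =====
-- stated objective: alternative
-- what changed: Replaces the hash-frequency dictionary plus key-scan with building the flat list of prefix keys, sorting it, and scanning consecutive runs for one of length exactly 2 (excluding the '-1_-1' sentinel).
import Mathlib
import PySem

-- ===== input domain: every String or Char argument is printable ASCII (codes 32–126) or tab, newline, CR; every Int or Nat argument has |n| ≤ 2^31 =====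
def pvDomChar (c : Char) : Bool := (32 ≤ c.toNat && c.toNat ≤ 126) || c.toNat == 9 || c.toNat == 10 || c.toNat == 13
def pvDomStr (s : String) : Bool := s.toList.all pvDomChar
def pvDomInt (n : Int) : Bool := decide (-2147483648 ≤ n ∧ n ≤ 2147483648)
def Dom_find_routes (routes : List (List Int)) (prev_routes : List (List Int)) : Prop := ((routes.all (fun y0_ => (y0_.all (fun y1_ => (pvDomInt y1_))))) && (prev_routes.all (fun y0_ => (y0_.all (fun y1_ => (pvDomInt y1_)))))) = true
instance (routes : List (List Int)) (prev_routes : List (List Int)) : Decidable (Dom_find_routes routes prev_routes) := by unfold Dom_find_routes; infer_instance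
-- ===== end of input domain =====

-- B replaces A's hash-frequency dictionary with sort-then-run-length scanning of the prefix keys (alternative algorithm, not claimed faster).

-- ===== PORT A =====
-- key = "_".join(map(str, route[:-1]))  (this expression appears verbatim in both Pythons)
def keyOf (route : List Int) : String :=
  PySem.Str.join "_" ((PySem.List.slice route none (some (-1))).map PySem.Int.toStr)

-- the body of A's two counting loops: if key in dictionary: +=1 else: =1
-- (dictionary[key] on the taken branch is read via getD 0; exact, since the key is present there)
def bumpA (d : PySem.Dict String Int) (route : List Int) : PySem.Dict String Int :=
  let key := keyOf route
  if d.contains key then d.insert key (d.getD key 0 + 1) else d.insert key 1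

-- A's final loop: for key in dictionary: if dictionary[key] == 2 and key != "-1_-1": return True
def scanDict (d : PySem.Dict String Int) : Bool :=
  d.keys.any (fun key => d.getD key 0 == 2 && key != "-1_-1")

def find_routes (routes : List (List Int)) (prev_routes : List (List Int)) : Bool :=
  scanDict (prev_routes.foldl bumpA (routes.foldl bumpA PySem.Dict.empty))

-- ===== PORT B =====
-- B's outer while-loop over the sorted key list: each step consumes one run i..j
def runScan : List String → Bool
  | [] => false
  | k :: rest =>
      if 1 + (rest.takeWhile (fun x => x == k)).length == 2 && k != "-1_-1" then true
      else runScan (rest.dropWhile (fun x => x == k))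
termination_by s => s.length
decreasing_by
  have := List.length_dropWhile_le (fun x => x == k) rest
  simp; omega

def find_routes_alt (routes : List (List Int)) (prev_routes : List (List Int)) : Bool :=
  runScan (PySem.List.sorted ((routes ++ prev_routes).map keyOf) (fun x => x) false)

-- ===== PRECONDITION & SPEC =====
def Spec_find_routes (routes : List (List Int)) (prev_routes : List (List Int)) (out : Bool) : Prop := out = find_routes_alt routes prev_routes
instance (routes : List (List Int)) (prev_routes : List (List Int)) (out : Bool) : Decidable (Spec_find_routes routes prev_routes out) := by unfold Spec_find_routes; infer_instance

-- ===== CLAIM (what is proved, stated in full; the proofs are below) =====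
def Claim_equal_find_routes : Prop := ∀ (routes : List (List Int)) (prev_routes : List (List Int)), Dom_find_routes routes prev_routes → Spec_find_routes routes prev_routes (find_routes routes prev_routes)

-- ===== LEMMAS AND PROOFS =====

-- A's branchy loop body is the standard counting insert
lemma bumpA_eq (d : PySem.Dict String Int) (r : List Int) :
    bumpA d r = d.insert (keyOf r) (d.getD (keyOf r) 0 + 1) := by
  unfold bumpA
  by_cases h : d.contains (keyOf r) = true
  · simp [h]
  · simp only [Bool.not_eq_true] at h
    simp [h, PySem.Dict.getD_of_not_contains d 0 h]

-- A computes: some key of the combined list has count exactly 2 and is not the sentinel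
lemma find_routes_char (routes prev_routes : List (List Int)) :
    find_routes routes prev_routes =
      (PySem.Set.ofList ((routes ++ prev_routes).map keyOf)).any
        (fun k => ((((routes ++ prev_routes).map keyOf).count k : Int) == 2) && k != "-1_-1") := by
  have hfold : ∀ (l : List (List Int)) (d : PySem.Dict String Int),
      l.foldl bumpA d = (l.map keyOf).foldl (fun d x => d.insert x (d.getD x 0 + 1)) d := by
    intro l
    induction l with
    | nil => intro d; rfl
    | cons a t ih => intro d; simp [List.foldl_cons, bumpA_eq, ih]
  unfold find_routes
  rw [hfold, hfold, ← List.foldl_append, ← List.map_append,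
    PySem.Dict.foldl_insert_getD_add_one_eq_counter]
  unfold scanDict
  rw [PySem.Dict.keys_counter]
  congr 1
  funext k
  rw [PySem.Dict.getD_counter]

-- any of a count/sentinel predicate is perm-invariant (membership and counts both transport)
lemma any_pred_perm {l l' : List String} (h : l.Perm l') :
    l.any (fun k => ((l.count k : Int) == 2) && k != "-1_-1") =
    l'.any (fun k => ((l'.count k : Int) == 2) && k != "-1_-1") := by
  rw [Bool.eq_iff_iff]
  simp only [List.any_eq_true]
  constructor
  · rintro ⟨x, hx, hp⟩
    exact ⟨x, h.mem_iff.mp hx, by rwa [← h.count_eq]⟩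
  · rintro ⟨x, hx, hp⟩
    exact ⟨x, h.mem_iff.mpr hx, by rwa [h.count_eq]⟩

-- after dropping the leading run of k's from a ≤-sorted list, no k remains
lemma dropWhile_all_ne (k : String) (rest : List String)
    (hpw : rest.Pairwise (· ≤ ·)) (hkle : ∀ x ∈ rest, k ≤ x) :
    ∀ x ∈ rest.dropWhile (fun y => y == k), x ≠ k := by
  cases hd : rest.dropWhile (fun y => y == k) with
  | nil => intro x hx; simp at hx
  | cons d0 t0 =>
    intro x hx
    have hne : rest.dropWhile (fun y => y == k) ≠ [] := by rw [hd]; simp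
    have hhead := List.head_dropWhile_not (fun y => y == k) hne
    have hheadeq : (rest.dropWhile (fun y => y == k)).head hne = d0 := by
      simp only [hd, List.head_cons]
    rw [hheadeq] at hhead
    have hd0ne : d0 ≠ k := by simpa using hhead
    have hd0mem : d0 ∈ rest := (List.dropWhile_sublist _).mem (by rw [hd]; simp)
    have hklt : k < d0 := lt_of_le_of_ne (hkle _ hd0mem) (Ne.symm hd0ne)
    have hpdw : (d0 :: t0).Pairwise (fun a b => a ≤ b) :=
      hd ▸ (List.Pairwise.sublist (List.dropWhile_sublist _) hpw)
    rcases List.mem_cons.mp hx with rfl | hx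
    · exact hd0ne
    · have hle : d0 ≤ x := (List.pairwise_cons.mp hpdw).1 x hx
      exact fun hxk => absurd (hxk ▸ hle) (not_le.mpr hklt)

-- on a ≤-sorted list, runScan decides the same count/sentinel predicate
lemma runScan_char : ∀ (n : Nat) (s : List String), s.length ≤ n →
    s.Pairwise (· ≤ ·) →
    runScan s = s.any (fun k => ((s.count k : Int) == 2) && k != "-1_-1") := by
  intro n
  induction n with
  | zero =>
    intro s hlen _
    have : s = [] := List.length_eq_zero_iff.mp (Nat.le_zero.mp hlen)
    subst this; simp [runScan]
  | succ m ih =>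
    intro s hlen hpw
    match s with
    | [] => simp [runScan]
    | k :: rest =>
      have hpwrest : rest.Pairwise (· ≤ ·) := hpw.of_cons
      have hkle : ∀ x ∈ rest, k ≤ x := fun x hx => (List.pairwise_cons.mp hpw).1 x hx
      set tw := rest.takeWhile (fun x => x == k) with htw
      set dw := rest.dropWhile (fun x => x == k) with hdw
      have hsplit : rest = tw ++ dw := (List.takeWhile_append_dropWhile).symm
      have htwk : ∀ x ∈ tw, x = k := by
        intro x hx
        have := List.mem_takeWhile_imp hx
        simpa using this
      have hdwne : ∀ x ∈ dw, x ≠ k := dropWhile_all_ne k rest hpwrest hkle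
      have hcount_tw : tw.count k = tw.length :=
        List.count_eq_length.mpr (fun b hb => (htwk b hb).symm)
      have hcount_dw_k : dw.count k = 0 :=
        List.count_eq_zero.mpr (fun hk => hdwne k hk rfl)
      have hcount_k : (k :: rest).count k = 1 + tw.length := by
        rw [hsplit]
        simp [List.count_append, hcount_tw, hcount_dw_k]
        omega
      have hcount_ne : ∀ x, x ≠ k → (k :: rest).count x = dw.count x := by
        intro x hxk
        rw [hsplit]
        have h0 : tw.count x = 0 := List.count_eq_zero.mpr (fun hx => hxk (htwk x hx))
        simp [List.count_append, h0, Ne.symm hxk]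
      have hlendw : dw.length ≤ m := by
        have h1 : dw.length ≤ rest.length := List.length_dropWhile_le _ _
        simp at hlen; omega
      have hpdw : dw.Pairwise (· ≤ ·) := List.Pairwise.sublist (List.dropWhile_sublist _) hpwrest
      have hih := ih dw hlendw hpdw
      have hcast : ∀ n : Nat, (((n : Int)) == (2 : Int)) = (n == 2) := by
        intro n; rw [Bool.eq_iff_iff]; simp; omega
      rw [runScan]
      simp only [← htw, ← hdw]
      have hany : ((k :: rest).any (fun x => (((k :: rest).count x : Int) == 2) && x != "-1_-1")) =
          ((1 + tw.length == 2 && k != "-1_-1") ||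
            dw.any (fun x => ((dw.count x : Int) == 2) && x != "-1_-1")) := by
        rw [Bool.eq_iff_iff]
        simp only [List.any_eq_true, Bool.or_eq_true]
        constructor
        · rintro ⟨x, hx, hp⟩
          by_cases hxk : x = k
          · subst hxk
            left; rwa [hcount_k, hcast] at hp
          · rcases List.mem_cons.mp hx with h | h
            · exact absurd h hxk
            · rw [hsplit, List.mem_append] at h
              rcases h with h | h
              · exact absurd (htwk x h) hxk
              · right; exact ⟨x, h, by rwa [hcount_ne x hxk] at hp⟩
        · rintro (hp | ⟨x, hx, hp⟩)
          · exact ⟨k, List.mem_cons_self, by rwa [hcount_k, hcast]⟩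
          · refine ⟨x, ?_, ?_⟩
            · exact List.mem_cons_of_mem _ (hsplit ▸ List.mem_append_right _ hx)
            · rwa [hcount_ne x (hdwne x hx)]
      rw [hany, hih]
      by_cases hc : (1 + tw.length == 2 && k != "-1_-1") = true
      · simp [hc]
      · simp only [Bool.not_eq_true] at hc
        simp [hc]

-- ===== VERDICT (by name: the statement is the Claim_ definition above) =====
theorem find_routes_spec : Claim_equal_find_routes := by
  intro routes prev_routes _
  unfold Spec_find_routes find_routes_alt
  have hperm : (PySem.List.sorted ((routes ++ prev_routes).map keyOf) (fun x => x) false).Perm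
      ((routes ++ prev_routes).map keyOf) :=
    PySem.List.sorted_perm _ _ _
  have hpw : (PySem.List.sorted ((routes ++ prev_routes).map keyOf) (fun x => x) false).Pairwise
      (· ≤ ·) := by
    simpa using PySem.List.sorted_pairwise ((routes ++ prev_routes).map keyOf) (fun x => x)
  rw [find_routes_char, runScan_char _ _ le_rfl hpw, any_pred_perm hperm, Bool.eq_iff_iff]
  simp only [List.any_eq_true, PySem.Set.mem_ofList]
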